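-- pv_equiv track=rewrite | github.com/sergei-r-loved/pythonmorsels-practice | tasks/jun/lstrip_task.py | lstrip
-- ===== SOURCE A (Python) =====
-- def lstrip(sequence, object_to_except):
--     sequence = [i for i in sequence]
--     if len(sequence) == 0:
--         return sequence
--     if callable(object_to_except):
--         for i in sequence:
--             if not object_to_except(i):
--                 yield i
--     else:
--         for index, element in enumerate(sequence):
--             if element != object_to_except:
--                 yield from sequence[index:]
--                 break
--         return []
-- ===== SOURCE B (Python) =====
-- def lstrip(sequence, object_to_except):
--     if callable(object_to_except):
--         for i in sequence:
--             if not object_to_except(i):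
--                 yield i
--     else:
--         started = False
--         for element in sequence:
--             if started or element != object_to_except:
--                 started = True
--                 yield element
-- ===== Notes on version B (the rewrite author's own statement) =====
-- stated objective: idiomatic
-- what changed: Replaces A's list materialization, length guard and enumerate-index-then-tail-slice-and-break loop with a single-pass boolean-flag loop that lazily skips leading matching elements and yields the rest.
import Mathlib
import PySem

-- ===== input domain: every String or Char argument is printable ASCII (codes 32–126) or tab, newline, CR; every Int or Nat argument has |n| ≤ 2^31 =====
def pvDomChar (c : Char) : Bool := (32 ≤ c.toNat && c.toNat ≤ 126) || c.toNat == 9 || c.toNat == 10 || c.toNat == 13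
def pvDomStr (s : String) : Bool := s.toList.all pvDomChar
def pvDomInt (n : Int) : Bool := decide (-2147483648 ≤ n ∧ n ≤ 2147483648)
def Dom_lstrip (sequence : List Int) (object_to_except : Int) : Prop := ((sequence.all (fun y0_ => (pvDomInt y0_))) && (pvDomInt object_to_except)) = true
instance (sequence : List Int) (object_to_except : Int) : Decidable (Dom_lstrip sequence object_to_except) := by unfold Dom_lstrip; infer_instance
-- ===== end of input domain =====

-- B replaces A's enumerate-index/tail-slice/break loop with a single-pass boolean-flag loop (idiomatic, same cost).


-- ===== PORT A =====
-- A's non-callable branch: scan enumerate(sequence); at the first element ≠ object_to_except,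
-- yield the tail slice sequence[index:] and break (the callable branch is unreachable for an Int argument).
def lstripLoopA (sequence : List Int) (object_to_except : Int) : List (Int × Int) → List Int
  | [] => []
  | (index, element) :: rest =>
      if element ≠ object_to_except then PySem.List.slice sequence (some index) none
      else lstripLoopA sequence object_to_except rest

def lstrip (sequence : List Int) (object_to_except : Int) : List Int :=
  if sequence.length = 0 then []
  else lstripLoopA sequence object_to_except (PySem.List.enumerate sequence 0)

-- ===== PORT B =====
-- B: single pass with a 'started' flag; yield element when started or element ≠ object_to_except.
def lstripLoopB (object_to_except : Int) : Bool → List Int → List Int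
  | _, [] => []
  | started, x :: xs =>
      if started || x ≠ object_to_except then x :: lstripLoopB object_to_except true xs
      else lstripLoopB object_to_except started xs

def lstrip_alt (sequence : List Int) (object_to_except : Int) : List Int :=
  lstripLoopB object_to_except false sequence

-- ===== PRECONDITION & SPEC =====
def Spec_lstrip (sequence : List Int) (object_to_except : Int) (out : List Int) : Prop := out = lstrip_alt sequence object_to_except
instance (sequence : List Int) (object_to_except : Int) (out : List Int) : Decidable (Spec_lstrip sequence object_to_except out) := by unfold Spec_lstrip; infer_instance

-- ===== CLAIM (what is proved, stated in full; the proofs are below) =====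
def Claim_equal_lstrip : Prop := ∀ (sequence : List Int) (object_to_except : Int), Dom_lstrip sequence object_to_except → Spec_lstrip sequence object_to_except (lstrip sequence object_to_except)

-- ===== LEMMAS AND PROOFS =====
theorem lstripLoopB_true (o : Int) (xs : List Int) : lstripLoopB o true xs = xs := by
  induction xs with
  | nil => rfl
  | cons x xs ih => simp [lstripLoopB, ih]

theorem loopA_eq_loopB (o : Int) (xs : List Int) : ∀ (k : Nat) (full : List Int),
    full.drop k = xs →
    lstripLoopA full o (PySem.List.enumerate xs (k : Int)) = lstripLoopB o false xs := by
  induction xs with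
  | nil => intro k full h; rfl
  | cons x xs ih =>
      intro k full h
      rw [PySem.List.enumerate_cons]
      by_cases hx : x = o
      · have h1 : full.drop (k + 1) = xs := by
          rw [← List.drop_drop, h]; rfl
        have hcast : ((k : Int) + 1) = ((k + 1 : Nat) : Int) := by push_cast; ring
        rw [hcast]
        simpa [lstripLoopA, lstripLoopB, hx] using ih (k + 1) full h1
      · simp [lstripLoopA, lstripLoopB, hx, PySem.List.slice_from_natCast, h,
          lstripLoopB_true]

-- ===== VERDICT (by name: the statement is the Claim_ definition above) =====
theorem lstrip_spec : Claim_equal_lstrip := by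
  intro sequence o _
  unfold Spec_lstrip lstrip lstrip_alt
  cases sequence with
  | nil => rfl
  | cons x xs =>
      simpa using loopA_eq_loopB o (x :: xs) 0 (x :: xs) (by simp)
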